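-- pv_equiv track=rewrite | github.com/ivdpol/quantifier-LZ-complexity | quantifiers.py | models_first_3
-- ===== SOURCE A (Python) =====
-- AB = 0 #A cap B
--
-- AnotB = 1 #A - B
--
-- def models_first_3(model):
--     """ Verifies whether the first 3 As in a sequence are Bs.
--
--     Args:
--         model:  a sequence of elements from (0,1,2,3), representing (AB,AnotB,BnotA,neither),
--                 the i'th element in the sequence represents the i'th object in the model
--
--     Returns:
--         True iff the first 3 elements of model that are either AB or AnotB are in fact AB.
--         False if either model has length less than n, or if on of the first 3 elements of model that are AB or AnotB are in fact AnotB,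
--         or if fewer than 3 elements in model are As
--     """
--     if len(model) < 3:
--         return False
--     count_AB = 0
--     for symbol in model:
--         if symbol == AB:
--             count_AB += 1
--             if count_AB == 3:
--                 return True
--         if symbol == AnotB:
--             return False
--     # there are less than 3 As
--     return False
-- ===== SOURCE B (Python) =====
-- AB = 0  # A cap B
-- AnotB = 1  # A - B
--
-- def models_first_3(model):
--     if len(model) < 3:
--         return False
--     prefix = model[:model.index(AnotB)] if AnotB in model else model
--     return prefix.count(AB) >= 3
-- ===== Notes on version B (the rewrite author's own statement) =====
-- stated objective: simpler
-- what changed: Replaces A's stateful single-pass counting loop with early returns by slicing the prefix before the first AnotB (via index/membership) and checking that this prefix contains at least 3 ABs with count.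
import Mathlib
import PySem

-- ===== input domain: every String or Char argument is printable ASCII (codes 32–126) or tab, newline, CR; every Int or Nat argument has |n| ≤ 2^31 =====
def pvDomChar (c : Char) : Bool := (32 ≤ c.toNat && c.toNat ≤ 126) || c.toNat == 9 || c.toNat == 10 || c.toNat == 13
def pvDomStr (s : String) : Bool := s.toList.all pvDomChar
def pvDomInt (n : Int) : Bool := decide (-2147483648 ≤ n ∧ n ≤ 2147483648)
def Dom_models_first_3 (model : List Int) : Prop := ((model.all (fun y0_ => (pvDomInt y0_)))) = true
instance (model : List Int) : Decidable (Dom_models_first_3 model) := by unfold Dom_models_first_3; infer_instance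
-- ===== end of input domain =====

-- B replaces A's stateful counting loop by slicing the prefix before the first AnotB and counting ABs in it (objective: simpler).


-- ===== PORT A =====
-- the for-loop of A, state = count_AB
def models_first_3_loop (model : List Int) (count_AB : Int) : Bool :=
  match model with
  | [] => false
  | symbol :: rest =>
    if symbol = 0 then
      if count_AB + 1 = 3 then true
      else if symbol = 1 then false
      else models_first_3_loop rest (count_AB + 1)
    else if symbol = 1 then false
    else models_first_3_loop rest count_AB

def models_first_3 (model : List Int) : Bool :=
  if model.length < 3 then false
  else models_first_3_loop model 0

-- ===== PORT B =====
-- 'model[:model.index(AnotB)] if AnotB in model else model': 'AnotB in model' holds iff index? = some,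
-- so the conditional expression is ported as one match on index? (the guarded index never raises).
def models_first_3_alt (model : List Int) : Bool :=
  if model.length < 3 then false
  else
    let pre :=
      match PySem.List.index? model 1 with
      | some i => PySem.List.slice model none (some (i : Int))
      | none => model
    decide (3 ≤ PySem.List.count pre 0)

-- ===== PRECONDITION & SPEC =====
def Spec_models_first_3 (model : List Int) (out : Bool) : Prop := out = models_first_3_alt model
instance (model : List Int) (out : Bool) : Decidable (Spec_models_first_3 model out) := by unfold Spec_models_first_3; infer_instance

-- ===== CLAIM (what is proved, stated in full; the proofs are below) =====
def Claim_equal_models_first_3 : Prop := ∀ (model : List Int), Dom_models_first_3 model → Spec_models_first_3 model (models_first_3 model)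

-- ===== LEMMAS AND PROOFS =====

-- B's prefix (the slice before the first 1, or the whole list) is takeWhile (· ≠ 1)
theorem pre_eq_takeWhile (model : List Int) :
    (match PySem.List.index? model 1 with
     | some i => PySem.List.slice model none (some (i : Int))
     | none => model)
      = model.takeWhile (fun s => !(s == 1)) := by
  induction model with
  | nil => simp [PySem.List.index?]
  | cons s rest ih =>
    by_cases h1 : s = 1
    · subst h1
      rw [PySem.List.index?_cons_self]
      show PySem.List.slice (1 :: rest) none (some ((0 : Nat) : Int))
          = List.takeWhile (fun s => !(s == 1)) (1 :: rest)
      rw [PySem.List.slice_to_natCast]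
      simp
    · have htw : List.takeWhile (fun s => !(s == (1:Int))) (s :: rest)
          = s :: List.takeWhile (fun s => !(s == 1)) rest := by
        simp [h1]
      rw [PySem.List.index?_cons_of_ne rest h1]
      cases hidx : PySem.List.index? rest 1 with
      | none =>
        have hr : rest = List.takeWhile (fun s => !(s == (1:Int))) rest := by
          have := ih; rw [hidx] at this; exact this
        simp only [Option.map_none]
        show s :: rest = List.takeWhile (fun s => !(s == 1)) (s :: rest)
        rw [htw, ← hr]
      | some i =>
        have hr : PySem.List.slice rest none (some (i : Int))
            = List.takeWhile (fun s => !(s == (1:Int))) rest := by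
          have := ih; rw [hidx] at this; exact this
        simp only [Option.map_some]
        show PySem.List.slice (s :: rest) none (some ((i + 1 : Nat) : Int))
            = List.takeWhile (fun s => !(s == 1)) (s :: rest)
        rw [PySem.List.slice_to_natCast, htw, ← hr, PySem.List.slice_to_natCast,
          List.take_succ_cons]

-- loop invariant: with k ABs already counted (k < 3), A's loop answers whether the
-- prefix before the first AnotB contains at least 3 - k ABs
theorem models_first_3_loop_eq (model : List Int) (k : Nat) (hk : k < 3) :
    models_first_3_loop model (k : Int)
      = decide (3 - k ≤ (model.takeWhile (fun s => !(s == 1))).count 0) := by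
  induction model generalizing k with
  | nil =>
    simp [models_first_3_loop]
    omega
  | cons s rest ih =>
    by_cases h1 : s = 1
    · subst h1
      have htw : List.takeWhile (fun s => !(s == (1:Int))) (1 :: rest) = [] := by simp
      rw [htw]
      simp [models_first_3_loop]
      omega
    · have htw : List.takeWhile (fun s => !(s == (1:Int))) (s :: rest)
          = s :: List.takeWhile (fun s => !(s == 1)) rest := by
        simp [h1]
      rw [htw]
      by_cases h0 : s = 0
      · subst h0
        rw [List.count_cons_self]
        by_cases h2 : k = 2
        · subst h2
          simp [models_first_3_loop]
        · have hk1 : k + 1 < 3 := by omega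
          have hc : ((k : Int) + 1) = ((k + 1 : Nat) : Int) := by push_cast; ring
          simp only [models_first_3_loop]
          rw [if_true, if_neg (by omega : ¬ ((k : Int) + 1 = 3)),
            if_neg (by norm_num : ¬ ((0:Int) = 1)), hc, ih (k+1) hk1]
          simp only [decide_eq_decide]
          omega
      · have hcnt : List.count (0:Int) (s :: List.takeWhile (fun s => !(s == 1)) rest)
            = List.count 0 (List.takeWhile (fun s => !(s == 1)) rest) := by
          simp [h0]
        rw [hcnt]
        simp only [models_first_3_loop, if_neg h0, if_neg h1]
        exact ih k hk

-- ===== VERDICT (by name: the statement is the Claim_ definition above) =====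
theorem models_first_3_spec : Claim_equal_models_first_3 := by
  intro model _
  unfold Spec_models_first_3 models_first_3 models_first_3_alt
  by_cases h : model.length < 3
  · simp [h]
  · simp only [if_neg h]
    rw [pre_eq_takeWhile, PySem.List.count_eq]
    have := models_first_3_loop_eq model 0 (by omega)
    simpa using this
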